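-- pv_equiv track=rewrite | github.com/abnerapsley1/VNTR_Genotyping | src/VNTR_GenotypingTool/Python/vntr_genotyping/_io.py | _gtf_attr
-- ===== SOURCE A (Python) =====
-- def _gtf_attr(attrs_str, key):
--     """Extract the value of a single attribute from a GTF attribute string."""
--     for token in attrs_str.split(";"):
--         token = token.strip()
--         if token.startswith(key):
--             parts = token.split('"')
--             if len(parts) >= 2:
--                 return parts[1]
--     return None
-- ===== SOURCE B (Python) =====
-- def _gtf_attr(attrs_str, key):
--     """Extract the value of a single attribute from a GTF attribute string.
--
--     Recursive partition-based scan: peel off the text before the first ';',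
--     test it, and recurse on the remainder; the value is cut out with find/slice
--     instead of building the split('"') list.
--     """
--     head, sep, rest = attrs_str.partition(';')
--     tok = head.strip()
--     if tok.startswith(key):
--         q = tok.find('"')
--         if q != -1:
--             q2 = tok.find('"', q + 1)
--             return tok[q + 1:] if q2 == -1 else tok[q + 1:q2]
--     return _gtf_attr(rest, key) if sep else None
-- ===== Notes on version B (the rewrite author's own statement) =====
-- stated objective: alternative
-- what changed: Replaced the split(';')-into-a-list / split('"')-into-parts token loop by a recursion that partitions off the text before the first ';' and cuts the quoted value out with find and slicing, never materialising the split lists.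
import Mathlib
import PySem

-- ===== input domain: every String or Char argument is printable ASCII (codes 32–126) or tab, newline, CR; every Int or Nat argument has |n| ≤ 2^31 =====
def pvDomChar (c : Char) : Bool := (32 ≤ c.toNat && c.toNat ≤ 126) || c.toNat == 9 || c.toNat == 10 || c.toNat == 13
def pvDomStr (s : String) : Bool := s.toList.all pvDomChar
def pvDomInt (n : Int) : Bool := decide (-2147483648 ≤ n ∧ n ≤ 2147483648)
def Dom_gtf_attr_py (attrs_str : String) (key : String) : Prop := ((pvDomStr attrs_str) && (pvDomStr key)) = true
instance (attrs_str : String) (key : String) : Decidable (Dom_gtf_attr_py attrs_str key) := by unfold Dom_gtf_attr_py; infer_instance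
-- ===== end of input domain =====

-- B replaces A's split(';')-tokens / split('"')-parts loop by a recursive partition-at-first-';'
-- scan that cuts the value out with find/slice; objective: alternative decomposition, no speed claim.

-- ===== PORT A =====
-- the `for token in attrs_str.split(";")` loop, with the two early-return `if`s;
-- `parts[1]` is `parts.getD 1 []` (safe: guarded by `2 ≤ parts.length`)
def gtfA_loop (key : List Char) : List (List Char) → Option (List Char)
  | [] => none
  | t :: ts =>
    let tok := PySem.Chars.strip t
    if PySem.Chars.startswith tok key then
      let parts := PySem.Chars.splitOn tok ['"']
      if 2 ≤ parts.length then some (parts.getD 1 []) else gtfA_loop key ts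
    else gtfA_loop key ts

def gtf_attr_py (attrs_str : String) (key : String) : Option String :=
  (gtfA_loop key.toList (PySem.Chars.splitOn attrs_str.toList [';'])).map String.ofList

-- ===== PORT B =====
-- the body of Source B after `tok = head.strip()`: startswith, find first '"', find the next one, slice
def tokValB (tok key : List Char) : Option (List Char) :=
  if PySem.Chars.startswith tok key then
    let q := PySem.Chars.find tok ['"']
    if q = -1 then none
    else
      let q2 := PySem.Chars.findFrom tok ['"'] (q + 1)
      if q2 = -1 then some (PySem.Chars.slice tok (some (q + 1)) none)
      else some (PySem.Chars.slice tok (some (q + 1)) (some q2))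
  else none

-- Source B's recursion `_gtf_attr(rest, key) if sep else None`, with `partition(';')` ported by hand as
-- find/take/drop (exact: head = text before the first ';', sep nonempty iff find ≠ -1); the Nat fuel
-- only makes the structural recursion explicit — with fuel > len it is never exhausted
def gtfB_go (key : List Char) : Nat → List Char → Option (List Char)
  | 0, _ => none
  | fuel + 1, s =>
    let i := PySem.Chars.find s [';']
    let head := if i = -1 then s else s.take i.toNat
    match tokValB (PySem.Chars.strip head) key with
    | some v => some v
    | none => if i = -1 then none else gtfB_go key fuel (s.drop (i.toNat + 1))

def gtf_attr_py_alt (attrs_str : String) (key : String) : Option String :=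
  (gtfB_go key.toList (attrs_str.toList.length + 1) attrs_str.toList).map String.ofList

-- ===== PRECONDITION & SPEC =====
def Spec_gtf_attr_py (attrs_str : String) (key : String) (out : Option String) : Prop := out = gtf_attr_py_alt attrs_str key
instance (attrs_str : String) (key : String) (out : Option String) : Decidable (Spec_gtf_attr_py attrs_str key out) := by unfold Spec_gtf_attr_py; infer_instance

-- ===== CLAIM (what is proved, stated in full; the proofs are below) =====
def Claim_equal_gtf_attr_py : Prop := ∀ (attrs_str : String) (key : String), Dom_gtf_attr_py attrs_str key → Spec_gtf_attr_py attrs_str key (gtf_attr_py attrs_str key)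

-- ===== LEMMAS AND PROOFS =====

-- reference shape of split-on-one-char: the segments of `s` between occurrences of `c`
def segs (c : Char) : List Char → List (List Char)
  | [] => [[]]
  | a :: t => if a = c then [] :: segs c t else (segs c t).modifyHead (a :: ·)

theorem segs_ne_nil (c : Char) (s : List Char) : segs c s ≠ [] := by
  induction s with
  | nil => simp [segs]
  | cons a t ih =>
    simp only [segs]
    split
    · simp
    · cases h : segs c t with
      | nil => exact absurd h ih
      | cons x xs => simp

theorem segs_of_not_mem (c : Char) (s : List Char) (h : c ∉ s) : segs c s = [s] := by
  induction s with
  | nil => rfl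
  | cons a t ih =>
    simp only [List.mem_cons, not_or] at h
    simp [segs, ih h.2, Ne.symm h.1]

theorem segs_append (c : Char) (t r : List Char) (h : c ∉ t) :
    segs c (t ++ c :: r) = t :: segs c r := by
  induction t with
  | nil => simp [segs]
  | cons a t' ih =>
    simp only [List.mem_cons, not_or] at h
    simp [segs, Ne.symm h.1, ih h.2]

theorem splitOn_go_eq (c : Char) : ∀ (fuel : Nat) (l cur acc : _), l.length < fuel →
    PySem.Chars.splitOn.go [c] fuel l cur acc
      = acc.reverse ++ (segs c l).modifyHead (cur.reverse ++ ·) := by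
  intro fuel
  induction fuel with
  | zero => intro l cur acc h; omega
  | succ fuel ih =>
    intro l cur acc h
    cases l with
    | nil => simp [PySem.Chars.splitOn.go, segs]
    | cons a rest =>
      by_cases hac : a = c
      · subst hac
        rw [show PySem.Chars.splitOn.go [a] (fuel+1) (a :: rest) cur acc
              = PySem.Chars.splitOn.go [a] fuel rest [] (cur.reverse :: acc) by
            simp [PySem.Chars.splitOn.go, List.isPrefixOf]]
        rw [ih rest [] (cur.reverse :: acc) (by simpa using Nat.lt_of_succ_lt_succ h)]
        cases hseg : segs a rest with
        | nil => exact absurd hseg (segs_ne_nil a rest)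
        | cons x xs => simp [segs, hseg]
      · rw [show PySem.Chars.splitOn.go [c] (fuel+1) (a :: rest) cur acc
              = PySem.Chars.splitOn.go [c] fuel rest (a :: cur) acc by
            simp [PySem.Chars.splitOn.go, List.isPrefixOf, Ne.symm hac]]
        rw [ih rest (a :: cur) acc (by simpa using Nat.lt_of_succ_lt_succ h)]
        cases hseg : segs c rest with
        | nil => exact absurd hseg (segs_ne_nil c rest)
        | cons x xs => simp [segs, hac, hseg]

theorem splitOn_eq_segs (c : Char) (s : List Char) :
    PySem.Chars.splitOn s [c] = segs c s := by
  rw [PySem.Chars.splitOn, splitOn_go_eq c (s.length + 1) s [] [] (by omega)]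
  cases hseg : segs c s with
  | nil => exact absurd hseg (segs_ne_nil c s)
  | cons x xs => simp

theorem find_decomp (c : Char) (s : List Char) (h : PySem.Chars.find s [c] ≠ -1) :
    c ∉ s.take (PySem.Chars.find s [c]).toNat ∧
    s = s.take (PySem.Chars.find s [c]).toNat ++ c :: s.drop ((PySem.Chars.find s [c]).toNat + 1) := by
  have hinf : [c] <:+: s := (PySem.Chars.find_ne_neg_one_iff s [c]).mp h
  have hnn : 0 ≤ PySem.Chars.find s [c] := (PySem.Chars.find_nonneg_iff s [c]).mpr hinf
  obtain ⟨hpre, hmin⟩ := PySem.Chars.find_spec (s := s) (sub := [c]) hnn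
  set i := (PySem.Chars.find s [c]).toNat with hi
  obtain ⟨r, hr⟩ := hpre
  simp only [List.singleton_append] at hr
  have hdropsucc : s.drop (i + 1) = r := by
    have := congrArg List.tail hr
    simpa [List.tail_drop] using this.symm
  constructor
  · intro hmem
    rw [List.mem_iff_getElem] at hmem
    obtain ⟨j, hj, hje⟩ := hmem
    have hjlen : j < s.length := by
      simp [List.length_take] at hj
      omega
    have hji : j < i := by simp [List.length_take] at hj; omega
    apply hmin j hji
    have : s.drop j = c :: s.drop (j + 1) := by
      rw [List.drop_eq_getElem_cons hjlen]
      congr 1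
      rw [← hje, List.getElem_take]
    exact ⟨s.drop (j+1), by simp [this]⟩
  · conv_lhs => rw [← List.take_append_drop i s]
    rw [← hr, hdropsucc]

theorem segs_of_find_neg (c : Char) (s : List Char) (h : PySem.Chars.find s [c] = -1) :
    segs c s = [s] := by
  apply segs_of_not_mem
  intro hmem
  exact absurd ((PySem.Chars.find_ne_neg_one_iff s [c]).mpr
    ((List.singleton_infix_iff c s).mpr hmem)) (by simp [h])

theorem segs_of_find_pos (c : Char) (s : List Char) (h : PySem.Chars.find s [c] ≠ -1) :
    segs c s = s.take (PySem.Chars.find s [c]).toNat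
      :: segs c (s.drop ((PySem.Chars.find s [c]).toNat + 1)) := by
  obtain ⟨hnm, hdec⟩ := find_decomp c s h
  conv_lhs => rw [hdec]
  exact segs_append c _ _ hnm

theorem find_toNat_lt (c : Char) (s : List Char) (h : PySem.Chars.find s [c] ≠ -1) :
    (PySem.Chars.find s [c]).toNat < s.length := by
  obtain ⟨hnm, hdec⟩ := find_decomp c s h
  have := congrArg List.length hdec
  simp at this
  omega

-- A's per-token answer (the two ifs of the loop body, with `none` for "keep looking")
def headA (key tok : List Char) : Option (List Char) :=
  if PySem.Chars.startswith tok key then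
    let parts := PySem.Chars.splitOn tok ['"']
    if 2 ≤ parts.length then some (parts.getD 1 []) else none
  else none

theorem headA_eq_tokValB (key tok : List Char) : headA key tok = tokValB tok key := by
  unfold headA tokValB
  by_cases hsw : PySem.Chars.startswith tok key = true
  · simp only [hsw, if_true]
    by_cases hq : PySem.Chars.find tok ['"'] = -1
    · simp [hq, splitOn_eq_segs, segs_of_find_neg _ _ hq]
    · have hnn : 0 ≤ PySem.Chars.find tok ['"'] :=
        (PySem.Chars.find_nonneg_iff tok ['"']).mpr ((PySem.Chars.find_ne_neg_one_iff tok ['"']).mp hq)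
      set qn := (PySem.Chars.find tok ['"']).toNat with hqn
      have hqcast : PySem.Chars.find tok ['"'] = (qn : Int) := by omega
      have hlt : qn < tok.length := find_toNat_lt _ _ hq
      set rest := tok.drop (qn + 1) with hrest
      have hsegs : PySem.Chars.splitOn tok ['"'] = tok.take qn :: segs '"' rest := by
        rw [splitOn_eq_segs, segs_of_find_pos _ _ hq]
      have hA : (if 2 ≤ (PySem.Chars.splitOn tok ['"']).length
            then some ((PySem.Chars.splitOn tok ['"']).getD 1 []) else none)
          = some ((segs '"' rest).getD 0 []) := by
        have h1 : segs '"' rest ≠ [] := segs_ne_nil _ _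
        have h1' : 1 ≤ (segs '"' rest).length := List.length_pos_iff.mpr h1
        rw [hsegs, if_pos (by simp; omega)]
        simp [List.getD]
      rw [hA, if_neg hq]
      have hff : PySem.Chars.findFrom tok ['"'] (PySem.Chars.find tok ['"'] + 1) none
          = if PySem.Chars.find rest ['"'] = -1 then -1
            else ((qn + 1 : Nat) : Int) + PySem.Chars.find rest ['"'] := by
        rw [hqcast, show ((qn : Int) + 1) = ((qn + 1 : Nat) : Int) by push_cast; ring]
        exact PySem.Chars.findFrom_natCast tok ['"'] (qn + 1) (by omega)
      by_cases hq2 : PySem.Chars.find rest ['"'] = -1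
      · rw [show PySem.Chars.findFrom tok ['"'] (PySem.Chars.find tok ['"'] + 1) none = -1 by
            rw [hff, if_pos hq2]]
        rw [if_pos rfl, segs_of_find_neg _ _ hq2]
        have hslice : PySem.Chars.slice tok (some (PySem.Chars.find tok ['"'] + 1)) none = rest := by
          rw [PySem.Chars.slice_eq_listSlice, hqcast,
            show ((qn : Int) + 1) = ((qn + 1 : Nat) : Int) by push_cast; ring,
            PySem.List.slice_from_natCast]
        rw [hslice]
        simp
      · have hj : 0 ≤ PySem.Chars.find rest ['"'] :=
          (PySem.Chars.find_nonneg_iff rest ['"']).mpr ((PySem.Chars.find_ne_neg_one_iff rest ['"']).mp hq2)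
        set j := (PySem.Chars.find rest ['"']).toNat with hjn
        have hjcast : PySem.Chars.find rest ['"'] = (j : Int) := by omega
        rw [show PySem.Chars.findFrom tok ['"'] (PySem.Chars.find tok ['"'] + 1) none
              = ((qn + 1 + j : Nat) : Int) by rw [hff, if_neg hq2, hjcast]; push_cast; ring]
        rw [if_neg (by omega), segs_of_find_pos _ _ hq2]
        have hslice : PySem.Chars.slice tok (some (PySem.Chars.find tok ['"'] + 1))
            (some ((qn + 1 + j : Nat) : Int)) = rest.take j := by
          rw [PySem.Chars.slice_eq_listSlice, hqcast,
            show ((qn : Int) + 1) = ((qn + 1 : Nat) : Int) by push_cast; ring,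
            PySem.List.slice_natCast, hrest]
          congr 1
          omega
        rw [hslice]
        simp [hjcast]
  · simp [hsw]

theorem gtfA_loop_cons (key t : List Char) (ts : List (List Char)) :
    gtfA_loop key (t :: ts)
      = match headA key (PySem.Chars.strip t) with
        | some v => some v
        | none => gtfA_loop key ts := by
  simp only [gtfA_loop, headA]
  by_cases hsw : PySem.Chars.startswith (PySem.Chars.strip t) key = true
  · simp only [hsw, if_true]
    by_cases hlen : 2 ≤ (PySem.Chars.splitOn (PySem.Chars.strip t) ['"']).length
    · simp [hlen]
    · simp [hlen]
  · simp [hsw]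

theorem main_eq (key : List Char) : ∀ (fuel : Nat) (s : List Char), s.length < fuel →
    gtfA_loop key (segs ';' s) = gtfB_go key fuel s := by
  intro fuel
  induction fuel with
  | zero => intro s h; omega
  | succ fuel ih =>
    intro s h
    by_cases hi : PySem.Chars.find s [';'] = -1
    · rw [segs_of_find_neg _ _ hi, gtfA_loop_cons, headA_eq_tokValB]
      simp only [gtfB_go, hi, if_true]
      cases tokValB (PySem.Chars.strip s) key with
      | none => simp [gtfA_loop]
      | some v => simp
    · have hlt := find_toNat_lt _ _ hi
      rw [segs_of_find_pos _ _ hi, gtfA_loop_cons, headA_eq_tokValB]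
      simp only [gtfB_go, hi, if_false]
      cases tokValB (PySem.Chars.strip (s.take (PySem.Chars.find s [';']).toNat)) key with
      | none =>
        simp only []
        rw [ih (s.drop ((PySem.Chars.find s [';']).toNat + 1)) (by simp [List.length_drop]; omega)]
      | some v => simp

-- ===== VERDICT (by name: the statement is the Claim_ definition above) =====
theorem gtf_attr_py_spec : Claim_equal_gtf_attr_py := by
  intro attrs_str key _
  unfold Spec_gtf_attr_py gtf_attr_py gtf_attr_py_alt
  rw [splitOn_eq_segs, main_eq key.toList (attrs_str.toList.length + 1) attrs_str.toList (by omega)]
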